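-- pv_equiv track=rewrite | github.com/jamesnewton-cmd/au-degree-audit-app | engines/management.py | cmap
-- ===== SOURCE A (Python) =====
-- def done(c):
--     return c["status"] == "grade posted" and c["grade"].upper() not in ("", "W", "WF", "DRP", "NC")
--
-- def ip(c):
--     return c["status"] == "current"
--
-- def sched(c):
--     return c["status"] == "scheduled"
--
-- def cmap(courses):
--     m = {}
--     for c in courses:
--         k = c["code"]
--         if k not in m:
--             m[k] = c
--         else:
--             e = m[k]
--             if done(c) and not done(e):
--                 m[k] = c
--             elif ip(c) and not done(e) and not ip(e):
--                 m[k] = c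
--             elif sched(c) and not done(e) and not ip(e) and not sched(e):
--                 m[k] = c
--     return m
-- ===== SOURCE B (Python) =====
-- def priority(c):
--     s = c.get("status")
--     if s == "grade posted" and c.get("grade", "").upper() not in ("", "W", "WF", "DRP", "NC"):
--         return 3
--     if s == "current":
--         return 2
--     if s == "scheduled":
--         return 1
--     return 0
--
-- def cmap(courses):
--     groups = {}
--     for c in courses:
--         groups.setdefault(c["code"], []).append(c)
--     return {k: max(lst, key=priority) for k, lst in groups.items()}
-- ===== Notes on version B (the rewrite author's own statement) =====
-- stated objective: alternative
-- what changed: A keeps a best-so-far course per code and resolves each duplicate with a three-branch elif cascade over done/ip/sched; B first groups the courses by code and then picks max(group, key=priority) with a single numeric priority function (first maximal element wins, as in A).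
import Mathlib
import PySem

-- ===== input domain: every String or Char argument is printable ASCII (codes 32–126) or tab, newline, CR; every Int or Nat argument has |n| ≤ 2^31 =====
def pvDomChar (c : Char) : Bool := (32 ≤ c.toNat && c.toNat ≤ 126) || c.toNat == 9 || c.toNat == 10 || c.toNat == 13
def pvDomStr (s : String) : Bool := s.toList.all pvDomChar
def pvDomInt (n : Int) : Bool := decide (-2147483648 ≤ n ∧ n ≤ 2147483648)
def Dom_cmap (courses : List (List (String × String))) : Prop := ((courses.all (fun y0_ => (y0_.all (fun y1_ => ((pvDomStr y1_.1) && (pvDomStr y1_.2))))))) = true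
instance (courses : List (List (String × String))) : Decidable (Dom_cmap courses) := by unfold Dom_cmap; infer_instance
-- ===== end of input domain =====

-- B groups the courses by code and takes the first priority-maximal course of each group,
-- replacing A's per-duplicate three-branch elif cascade; same cost (objective: alternative).

-- c[k] for the course dicts; exact inside Pre_cmap (the key is present there; Python raises KeyError on a missing key)
def pvLook (c : List (String × String)) (k : String) : String := (PySem.Dict.mk c).getD k ""

-- ===== PORT A =====
def doneA (c : List (String × String)) : Bool :=
  pvLook c "status" == "grade posted" &&
    !(["", "W", "WF", "DRP", "NC"].contains (PySem.Str.upper (pvLook c "grade")))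

def ipA (c : List (String × String)) : Bool := pvLook c "status" == "current"

def schedA (c : List (String × String)) : Bool := pvLook c "status" == "scheduled"

def cmapStep (m : PySem.Dict String (List (String × String))) (c : List (String × String)) :
    PySem.Dict String (List (String × String)) :=
  match m.get? (pvLook c "code") with
  | none => m.insert (pvLook c "code") c
  | some e =>
    if doneA c && !doneA e then m.insert (pvLook c "code") c
    else if ipA c && !doneA e && !ipA e then m.insert (pvLook c "code") c
    else if schedA c && !doneA e && !ipA e && !schedA e then m.insert (pvLook c "code") c
    else m

def cmap (courses : List (List (String × String))) : List (String × List (String × String)) :=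
  (courses.foldl cmapStep PySem.Dict.empty).items

-- ===== PORT B =====
def priorityB (c : List (String × String)) : Int :=
  let s := pvLook c "status"
  if s == "grade posted" &&
      !(["", "W", "WF", "DRP", "NC"].contains (PySem.Str.upper (pvLook c "grade"))) then 3
  else if s == "current" then 2
  else if s == "scheduled" then 1
  else 0

-- max(lst, key=priority): first maximal element (Python max raises on [], unreachable here)
def maxByPrio : List (List (String × String)) → List (String × String)
  | [] => []
  | x :: xs => xs.foldl (fun b c => if priorityB c > priorityB b then c else b) x

-- groups.setdefault(c["code"], []).append(c): in-place append = overwrite-in-place insert of the extended list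
def groupStep (g : PySem.Dict String (List (List (String × String)))) (c : List (String × String)) :
    PySem.Dict String (List (List (String × String))) :=
  g.insert (pvLook c "code") (g.getD (pvLook c "code") [] ++ [c])

def cmap_alt (courses : List (List (String × String))) : List (String × List (String × String)) :=
  let groups := courses.foldl groupStep PySem.Dict.empty
  groups.items.map (fun p => (p.1, maxByPrio p.2))

-- ===== PRECONDITION & SPEC =====
-- Pre_ excludes courses missing the "code" key, and courses of a duplicated code missing "status"
-- (or "grade" while status is "grade posted"): A raises KeyError on such lookups; Pre_ is slightly
-- conservative because A's short-circuiting sometimes skips reading the earlier course's keys and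
-- returns — B returns the same value there (see the cite in claim.json).
def Pre_cmap (courses : List (List (String × String))) : Prop :=
  ∀ c ∈ courses, (PySem.Dict.mk c).contains "code" = true ∧
    (1 < courses.countP
        (fun c' => (PySem.Dict.mk c').getD "code" "" == (PySem.Dict.mk c).getD "code" "") →
      (PySem.Dict.mk c).contains "status" = true ∧
      ((PySem.Dict.mk c).getD "status" "" = "grade posted" →
        (PySem.Dict.mk c).contains "grade" = true))
instance (courses : List (List (String × String))) : Decidable (Pre_cmap courses) := by
  unfold Pre_cmap; infer_instance

def pvWitness_cmap : (List (List (String × String))) :=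
  [[("code", "CS101"), ("status", "current"), ("grade", "")],
   [("code", "CS101"), ("status", "grade posted"), ("grade", "A")]]

def Spec_cmap (courses : List (List (String × String))) (out : List (String × List (String × String))) : Prop := out = cmap_alt courses
instance (courses : List (List (String × String))) (out : List (String × List (String × String))) : Decidable (Spec_cmap courses out) := by unfold Spec_cmap; infer_instance

-- ===== CLAIM (what is proved, stated in full; the proofs are below) =====
def Claim_equal_cmap : Prop := ∀ (courses : List (List (String × String))), Dom_cmap courses → Pre_cmap courses → Spec_cmap courses (cmap courses)


-- ===== LEMMAS AND PROOFS =====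

def pvF (p : String × List (List (String × String))) : String × List (String × String) :=
  (p.1, maxByPrio p.2)

def mapVals (g : PySem.Dict String (List (List (String × String)))) :
    PySem.Dict String (List (String × String)) :=
  PySem.Dict.mk (g.items.map pvF)

theorem get?_map_mk (l : List (String × List (List (String × String)))) (k : String) :
    (PySem.Dict.mk (l.map pvF)).get? k = ((PySem.Dict.mk l).get? k).map maxByPrio := by
  induction l with
  | nil => rfl
  | cons p t ih =>
    obtain ⟨a, b⟩ := p
    simp only [List.map_cons, pvF, PySem.Dict.get?_mk_cons]
    split <;> simp [ih]

theorem get?_mapVals (g : PySem.Dict String (List (List (String × String)))) (k : String) :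
    (mapVals g).get? k = (g.get? k).map maxByPrio := by
  obtain ⟨l⟩ := g
  exact get?_map_mk l k

theorem keys_mapVals (g : PySem.Dict String (List (List (String × String)))) :
    (mapVals g).keys = g.keys := by
  obtain ⟨l⟩ := g
  simp [mapVals, PySem.Dict.keys, pvF]

theorem insert_mapVals (g : PySem.Dict String (List (List (String × String))))
    (k : String) (v : List (List (String × String))) :
    mapVals (g.insert k v) = (mapVals g).insert k (maxByPrio v) := by
  obtain ⟨l⟩ := g
  have hc : (PySem.Dict.mk (l.map pvF)).contains k = (PySem.Dict.mk l).contains k := by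
    rw [PySem.Dict.contains_eq_isSome_get?, PySem.Dict.contains_eq_isSome_get?, get?_map_mk]
    cases (PySem.Dict.mk l).get? k <;> rfl
  apply PySem.Dict.ext
  show ((PySem.Dict.mk l).insert k v).items.map pvF
      = ((PySem.Dict.mk (l.map pvF)).insert k (maxByPrio v)).items
  rw [PySem.Dict.items_insert, PySem.Dict.items_insert, hc]
  by_cases h : (PySem.Dict.mk l).contains k = true
  · simp only [h, if_true]
    show (l.map _).map pvF = (l.map pvF).map _
    rw [List.map_map, List.map_map]
    apply List.map_congr_left
    intro p _
    obtain ⟨a, b⟩ := p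
    by_cases hk : a = k <;> simp [pvF, hk]
  · simp only [Bool.not_eq_true] at h
    rw [h]
    simp [pvF]

theorem map_replace_self (l : List (String × List (String × String))) (k : String)
    (v : List (String × String)) (hnd : (l.map (·.1)).Nodup)
    (hget : (PySem.Dict.mk l).get? k = some v) :
    l.map (fun p => if p.1 == k then (k, v) else p) = l := by
  induction l with
  | nil => rfl
  | cons p t ih =>
    obtain ⟨a, b⟩ := p
    simp only [List.map_cons, List.nodup_cons] at hnd
    rw [PySem.Dict.get?_mk_cons] at hget
    by_cases hk : (a == k) = true
    · obtain rfl : a = k := by simpa using hk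
      simp only [hk, if_true] at hget
      obtain rfl : b = v := by simpa using hget
      simp only [List.map_cons, beq_self_eq_true, if_true]
      congr 1
      have : ∀ q ∈ t, (fun p => if (p.1 == a) = true then (a, b) else p) q = id q := by
        intro q hq
        have hqa : q.1 ≠ a := fun h => hnd.1 (h ▸ List.mem_map_of_mem hq)
        simp [hqa]
      rw [List.map_congr_left this, List.map_id]
    · rw [if_neg hk] at hget
      simp only [List.map_cons]
      rw [if_neg hk, ih hnd.2 hget]

theorem insert_self_of_get? (d : PySem.Dict String (List (String × String))) (k : String)
    (v : List (String × String)) (hnd : d.keys.Nodup) (hget : d.get? k = some v) :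
    d.insert k v = d := by
  have hc : d.contains k = true := by
    rw [PySem.Dict.contains_eq_isSome_get?, hget]; rfl
  apply PySem.Dict.ext
  rw [PySem.Dict.items_insert, hc, if_pos rfl]
  obtain ⟨l⟩ := d
  exact map_replace_self l k v hnd hget

theorem maxByPrio_append (x : List (String × String)) (xs : List (List (String × String)))
    (c : List (String × String)) :
    maxByPrio ((x :: xs) ++ [c]) =
      if priorityB c > priorityB (maxByPrio (x :: xs)) then c else maxByPrio (x :: xs) := by
  simp [maxByPrio, List.foldl_append]

theorem priorityB_eq (c : List (String × String)) :
    priorityB c = if doneA c then 3 else if ipA c then 2 else if schedA c then 1 else 0 := rfl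

theorem cascade_eq (c e : List (String × String))
    (m : PySem.Dict String (List (String × String))) (k : String) :
    (if doneA c && !doneA e then m.insert k c
     else if ipA c && !doneA e && !ipA e then m.insert k c
     else if schedA c && !doneA e && !ipA e && !schedA e then m.insert k c
     else m) = (if priorityB c > priorityB e then m.insert k c else m) := by
  rw [priorityB_eq, priorityB_eq]
  cases doneA c <;> cases doneA e <;> cases ipA c <;> cases ipA e <;>
    cases schedA c <;> cases schedA e <;> norm_num

theorem step_eq (g : PySem.Dict String (List (List (String × String))))
    (c : List (String × String)) (hnd : g.keys.Nodup)
    (hne : ∀ p ∈ g.items, p.2 ≠ []) :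
    cmapStep (mapVals g) c = mapVals (groupStep g c) := by
  unfold cmapStep groupStep
  cases h : g.get? (pvLook c "code") with
  | none =>
    rw [get?_mapVals, h, PySem.Dict.getD_eq_get?_getD, h]
    simp only [Option.map_none, Option.getD_none, List.nil_append]
    rw [insert_mapVals]
    rfl
  | some lst =>
    have hmem := PySem.Dict.mem_items_of_get?_eq_some _ h
    have hlst : lst ≠ [] := hne _ hmem
    rw [get?_mapVals, h, PySem.Dict.getD_eq_get?_getD, h]
    simp only [Option.map_some, Option.getD_some]
    rw [insert_mapVals, cascade_eq]
    obtain ⟨x, xs, rfl⟩ : ∃ y ys, lst = y :: ys := by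
      cases lst with
      | nil => exact absurd rfl hlst
      | cons y ys => exact ⟨y, ys, rfl⟩
    rw [maxByPrio_append]
    by_cases hgt : priorityB c > priorityB (maxByPrio (x :: xs))
    · simp [hgt]
    · simp only [hgt, if_false]
      have hget : (mapVals g).get? (pvLook c "code") = some (maxByPrio (x :: xs)) := by
        rw [get?_mapVals, h]; rfl
      have hnd' : (mapVals g).keys.Nodup := by rw [keys_mapVals]; exact hnd
      exact (insert_self_of_get? _ _ _ hnd' hget).symm

theorem loop_eq (cs : List (List (String × String)))
    (g : PySem.Dict String (List (List (String × String)))) (hnd : g.keys.Nodup)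
    (hne : ∀ p ∈ g.items, p.2 ≠ []) :
    cs.foldl cmapStep (mapVals g) = mapVals (cs.foldl groupStep g) := by
  induction cs generalizing g with
  | nil => rfl
  | cons c cs ih =>
    simp only [List.foldl_cons]
    rw [step_eq g c hnd hne]
    apply ih
    · exact PySem.Dict.nodup_keys_insert _ _ _ hnd
    · intro p hp
      rcases (PySem.Dict.mem_items_insert _ _ _ _).mp hp with rfl | ⟨hp', _⟩
      · simp
      · exact hne _ hp'

-- ===== VERDICT (by name: the statement is the Claim_ definition above) =====
theorem cmap_spec : Claim_equal_cmap := by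
  intro courses _ _
  show cmap courses = cmap_alt courses
  unfold cmap cmap_alt
  have h := loop_eq courses PySem.Dict.empty (by simp [PySem.Dict.keys, PySem.Dict.empty])
    (by intro p hp; simp [PySem.Dict.empty] at hp)
  have he : mapVals PySem.Dict.empty = PySem.Dict.empty := rfl
  rw [he] at h
  rw [h]
  rfl
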